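-- pv_equiv track=rewrite | github.com/Nayoung1124/Python-Study | [1] No idea/No idea_jiwon.py | NoIdea
-- ===== SOURCE A (Python) =====
-- def NoIdea(A, B, array):
--     happiness = 0
--     for x in array:
--         if x in A:
--             happiness += 1
--         elif x in B:
--             happiness -= 1
--     return happiness
-- ===== SOURCE B (Python) =====
-- def NoIdea(A, B, array):
--     cnt = {}
--     for x in array:
--         cnt[x] = cnt.get(x, 0) + 1
--     setA = set(A)
--     pos = sum(cnt.get(v, 0) for v in setA)
--     neg = sum(cnt.get(v, 0) for v in set(B) if v not in setA)
--     return pos - neg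
-- ===== Notes on version B (the rewrite author's own statement) =====
-- stated objective: alternative
-- what changed: Instead of scanning array once with membership tests per element, B builds a frequency table of array and sums counts over the distinct values of A and of B (guarded by 'not in setA' to mirror the elif), inverting the driving loop.
import Mathlib
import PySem

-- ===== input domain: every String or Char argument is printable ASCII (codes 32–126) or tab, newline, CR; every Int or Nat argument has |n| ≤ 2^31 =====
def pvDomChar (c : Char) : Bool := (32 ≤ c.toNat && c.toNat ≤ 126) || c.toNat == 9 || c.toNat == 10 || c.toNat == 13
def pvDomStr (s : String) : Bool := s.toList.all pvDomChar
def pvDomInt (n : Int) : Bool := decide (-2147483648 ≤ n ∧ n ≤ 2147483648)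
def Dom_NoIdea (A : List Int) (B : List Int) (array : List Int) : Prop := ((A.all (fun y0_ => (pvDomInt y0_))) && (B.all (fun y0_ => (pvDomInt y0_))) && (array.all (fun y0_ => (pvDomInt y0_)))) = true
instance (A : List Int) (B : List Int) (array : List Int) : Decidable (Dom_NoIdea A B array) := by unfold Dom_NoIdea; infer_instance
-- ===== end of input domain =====

-- B replaces A's single scan (with per-element membership tests) by a frequency table of
-- `array` summed over the distinct values of A and B; same return value, alternative algorithm.

-- ===== PORT A =====
def NoIdea (A : List Int) (B : List Int) (array : List Int) : Int :=
  array.foldl (fun happiness x =>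
    if A.contains x then happiness + 1
    else if B.contains x then happiness - 1
    else happiness) 0

-- ===== PORT B =====
def NoIdea_alt (A : List Int) (B : List Int) (array : List Int) : Int :=
  let cnt : PySem.Dict Int Int :=
    array.foldl (fun d x => d.insert x (d.getD x 0 + 1)) PySem.Dict.empty
  let setA : PySem.Set Int := PySem.Set.ofList A
  let pos := (setA.map (fun v => cnt.getD v 0)).sum
  let neg := (((PySem.Set.ofList B).filter (fun v => !(PySem.Set.contains setA v))).map
      (fun v => cnt.getD v 0)).sum
  pos - neg

-- ===== PRECONDITION & SPEC =====
def Spec_NoIdea (A : List Int) (B : List Int) (array : List Int) (out : Int) : Prop := out = NoIdea_alt A B array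
instance (A : List Int) (B : List Int) (array : List Int) (out : Int) : Decidable (Spec_NoIdea A B array out) := by unfold Spec_NoIdea; infer_instance

-- ===== CLAIM (what is proved, stated in full; the proofs are below) =====
def Claim_equal_NoIdea : Prop := ∀ (A : List Int) (B : List Int) (array : List Int), Dom_NoIdea A B array → Spec_NoIdea A B array (NoIdea A B array)

-- ===== LEMMAS AND PROOFS =====

-- sum of counts of (x :: t) over a duplicate-free list S = indicator of x ∈ S + sum over t
theorem sum_count_cons (S : List Int) (hS : S.Nodup) (x : Int) (t : List Int) :
    (S.map (fun v => ((x :: t).count v : Int))).sum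
      = (if x ∈ S then 1 else 0) + (S.map (fun v => (t.count v : Int))).sum := by
  induction S with
  | nil => simp
  | cons s S ih =>
    simp only [List.nodup_cons] at hS
    simp only [List.map_cons, List.sum_cons, List.mem_cons]
    rw [ih hS.2]
    by_cases hx : x = s
    · subst hx
      simp [hS.1]
      ring
    · simp [hx]
      ring

-- the accumulator of A's fold is additive
theorem foldl_shift (A B t : List Int) (a : Int) :
    t.foldl (fun happiness x =>
      if A.contains x then happiness + 1
      else if B.contains x then happiness - 1
      else happiness) a
    = a + t.foldl (fun happiness x =>
      if A.contains x then happiness + 1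
      else if B.contains x then happiness - 1
      else happiness) 0 := by
  induction t generalizing a with
  | nil => simp
  | cons y t ih =>
    simp only [List.foldl_cons]
    rw [ih, ih (if A.contains y then (0:Int) + 1 else if B.contains y then 0 - 1 else 0)]
    split_ifs <;> ring

theorem NoIdea_eq_sums (A B : List Int) (t : List Int) :
    NoIdea A B t
      = ((PySem.Set.ofList A).map (fun v => (t.count v : Int))).sum
        - (((PySem.Set.ofList B).filter
              (fun v => !(PySem.Set.contains (PySem.Set.ofList A) v))).map
            (fun v => (t.count v : Int))).sum := by
  induction t with
  | nil => simp [NoIdea]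
  | cons x t ih =>
    have hA : (PySem.Set.ofList A).Nodup := PySem.Set.nodup_ofList A
    have hBf : ((PySem.Set.ofList B).filter
        (fun v => !(PySem.Set.contains (PySem.Set.ofList A) v))).Nodup :=
      (PySem.Set.nodup_ofList B).filter _
    rw [sum_count_cons _ hA, sum_count_cons _ hBf]
    have hstep : NoIdea A B (x :: t)
        = (if A.contains x then (1:Int) else if B.contains x then -1 else 0) + NoIdea A B t := by
      simp only [NoIdea, List.foldl_cons]
      rw [foldl_shift]
      split_ifs <;> ring_nf
    rw [hstep, ih]
    by_cases hxA : x ∈ A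
    · have h1 : x ∈ PySem.Set.ofList A := (PySem.Set.mem_ofList A x).mpr hxA
      simp [hxA, h1, List.mem_filter, PySem.Set.contains]
      ring
    · by_cases hxB : x ∈ B
      · have h1 : x ∉ PySem.Set.ofList A := fun h => hxA ((PySem.Set.mem_ofList A x).mp h)
        simp [hxA, hxB, h1, List.mem_filter, PySem.Set.contains, PySem.Set.mem_ofList]
        ring
      · simp [hxA, hxB, List.mem_filter, PySem.Set.mem_ofList]

-- ===== VERDICT (by name: the statement is the Claim_ definition above) =====
theorem NoIdea_spec : Claim_equal_NoIdea := by
  intro A B array _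
  unfold Spec_NoIdea NoIdea_alt
  simp only [PySem.Dict.foldl_insert_getD_add_one_eq_counter, PySem.Dict.getD_counter]
  exact NoIdea_eq_sums A B array
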